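-- pv_equiv track=rewrite | github.com/Anitej05/Orchestrator | backend/migrate_agent_schema.py | detect_capability_categories
-- ===== SOURCE A (Python) =====
-- from typing import Dict, List, Any
--
-- def detect_capability_categories(capabilities: List[str]) -> Dict[str, List[str]]:
--     """
--     Automatically detect and group capabilities into categories based on keywords.
--
--     Args:
--         capabilities: List of capability strings
--
--     Returns:
--         Dictionary mapping category names to lists of capabilities
--     """
--     categories = {
--         "Email Management": [],
--         "Document Operations": [],
--         "Data Analysis": [],
--         "Web Automation": [],
--         "File Operations": [],
--         "Communication": [],
--         "Search & Discovery": [],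
--         "Content Creation": [],
--         "Integration": [],
--         "General": []
--     }
--
--     # Keywords that indicate category
--     category_keywords = {
--         "Email Management": ["email", "mail", "inbox", "send", "compose", "message"],
--         "Document Operations": ["document", "doc", "docx", "pdf", "word", "edit", "format"],
--         "Data Analysis": ["analyze", "analysis", "summarize", "extract", "rag", "question"],
--         "Web Automation": ["browser", "web", "automation", "browse", "navigate", "click"],
--         "File Operations": ["file", "upload", "download", "save", "delete", "attachment"],
--         "Communication": ["slack", "discord", "chat", "notify", "webhook"],
--         "Search & Discovery": ["search", "find", "lookup", "query", "discover"],
--         "Content Creation": ["create", "generate", "write", "compose", "build"],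
--         "Integration": ["api", "integration", "connect", "sync", "zoho", "composio"]
--     }
--
--     for cap in capabilities:
--         cap_lower = cap.lower()
--         categorized = False
--
--         # Check each category's keywords
--         for category, keywords in category_keywords.items():
--             if any(keyword in cap_lower for keyword in keywords):
--                 categories[category].append(cap)
--                 categorized = True
--                 break
--
--         # If not categorized, put in General
--         if not categorized:
--             categories["General"].append(cap)
--
--     # Remove empty categories
--     return {k: v for k, v in categories.items() if v}
-- ===== SOURCE B (Python) =====
-- def detect_capability_categories(capabilities):
--     """Group capability strings into keyword categories (loops transposed:
--     iterate categories, maintaining the list of not-yet-assigned capabilities)."""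
--     category_keywords = {
--         "Email Management": ["email", "mail", "inbox", "send", "compose", "message"],
--         "Document Operations": ["document", "doc", "docx", "pdf", "word", "edit", "format"],
--         "Data Analysis": ["analyze", "analysis", "summarize", "extract", "rag", "question"],
--         "Web Automation": ["browser", "web", "automation", "browse", "navigate", "click"],
--         "File Operations": ["file", "upload", "download", "save", "delete", "attachment"],
--         "Communication": ["slack", "discord", "chat", "notify", "webhook"],
--         "Search & Discovery": ["search", "find", "lookup", "query", "discover"],
--         "Content Creation": ["create", "generate", "write", "compose", "build"],
--         "Integration": ["api", "integration", "connect", "sync", "zoho", "composio"],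
--     }
--     result = {}
--     remaining = list(capabilities)
--     for category, keywords in category_keywords.items():
--         matched = [cap for cap in remaining if any(kw in cap.lower() for kw in keywords)]
--         if matched:
--             result[category] = matched
--         remaining = [cap for cap in remaining if not any(kw in cap.lower() for kw in keywords)]
--     if remaining:
--         result["General"] = remaining
--     return result
-- ===== Notes on version B (the rewrite author's own statement) =====
-- stated objective: alternative
-- what changed: Loops are transposed: instead of scanning the category table per capability with a break flag, B iterates the categories once, splitting a running list of not-yet-assigned capabilities into matched/remaining per category, with leftovers becoming 'General'.
import Mathlib
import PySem

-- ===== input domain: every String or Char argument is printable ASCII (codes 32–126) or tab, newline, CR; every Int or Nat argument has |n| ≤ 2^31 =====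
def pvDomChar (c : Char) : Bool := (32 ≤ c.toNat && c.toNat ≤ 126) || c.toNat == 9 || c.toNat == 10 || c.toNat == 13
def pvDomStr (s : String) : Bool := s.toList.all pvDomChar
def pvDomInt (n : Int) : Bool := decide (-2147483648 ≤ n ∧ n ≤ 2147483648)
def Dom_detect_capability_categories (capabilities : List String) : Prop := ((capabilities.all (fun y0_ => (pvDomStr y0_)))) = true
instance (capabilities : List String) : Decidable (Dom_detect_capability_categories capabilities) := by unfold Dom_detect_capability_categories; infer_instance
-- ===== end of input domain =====

-- B re-implements A with the loops transposed (outer loop over categories, maintaining the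
-- list of not-yet-assigned capabilities); same return value, no speed claim.

-- ===== PORT A =====
-- the category_keywords table (shared literal data of both Python versions)
def pvCats : List (String × List String) :=
  [("Email Management", ["email", "mail", "inbox", "send", "compose", "message"]),
   ("Document Operations", ["document", "doc", "docx", "pdf", "word", "edit", "format"]),
   ("Data Analysis", ["analyze", "analysis", "summarize", "extract", "rag", "question"]),
   ("Web Automation", ["browser", "web", "automation", "browse", "navigate", "click"]),
   ("File Operations", ["file", "upload", "download", "save", "delete", "attachment"]),
   ("Communication", ["slack", "discord", "chat", "notify", "webhook"]),
   ("Search & Discovery", ["search", "find", "lookup", "query", "discover"]),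
   ("Content Creation", ["create", "generate", "write", "compose", "build"]),
   ("Integration", ["api", "integration", "connect", "sync", "zoho", "composio"])]

-- A's initial 'categories' dict (all ten lists empty)
def pvD0 : PySem.Dict String (List String) := PySem.Dict.ofList
  [("Email Management", []), ("Document Operations", []), ("Data Analysis", []),
   ("Web Automation", []), ("File Operations", []), ("Communication", []),
   ("Search & Discovery", []), ("Content Creation", []), ("Integration", []), ("General", [])]

-- A's inner 'for category, keywords … break' loop plus the 'if not categorized' tail
def pvCategorize : List (String × List String) → PySem.Dict String (List String) → String → String → PySem.Dict String (List String)
  | [], d, cap, _ => d.modify "General" [] (· ++ [cap])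
  | (c, kws) :: t, d, cap, capLower =>
      if kws.any (fun kw => PySem.Str.isIn kw capLower) then d.modify c [] (· ++ [cap])
      else pvCategorize t d cap capLower

def detect_capability_categories (capabilities : List String) : List (String × List String) :=
  let d := capabilities.foldl (fun d cap => pvCategorize pvCats d cap (PySem.Str.lower cap)) pvD0
  d.items.filter (fun p => !p.2.isEmpty)

-- ===== PORT B =====
def detect_capability_categories_alt (capabilities : List String) : List (String × List String) :=
  let p := pvCats.foldl
    (fun (p : List (String × List String) × List String) ckws =>
      let m := p.2.filter (fun cap => ckws.2.any (fun kw => PySem.Str.isIn kw (PySem.Str.lower cap)))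
      let r := p.2.filter (fun cap => !ckws.2.any (fun kw => PySem.Str.isIn kw (PySem.Str.lower cap)))
      (if m.isEmpty then p.1 else p.1 ++ [(ckws.1, m)], r))
    ([], capabilities)
  if p.2.isEmpty then p.1 else p.1 ++ [("General", p.2)]

-- ===== PRECONDITION & SPEC =====
def Spec_detect_capability_categories (capabilities : List String) (out : List (String × List String)) : Prop := out = detect_capability_categories_alt capabilities
instance (capabilities : List String) (out : List (String × List String)) : Decidable (Spec_detect_capability_categories capabilities out) := by unfold Spec_detect_capability_categories; infer_instance

-- ===== CLAIM (what is proved, stated in full; the proofs are below) =====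
def Claim_equal_detect_capability_categories : Prop := ∀ (capabilities : List String), Dom_detect_capability_categories capabilities → Spec_detect_capability_categories capabilities (detect_capability_categories capabilities)

-- ===== LEMMAS AND PROOFS =====

-- whether cap matches one of the keywords
def pvMatch (kws : List String) (cap : String) : Bool :=
  kws.any (fun kw => PySem.Str.isIn kw (PySem.Str.lower cap))

-- first category of the table matching cap, if any
def pvFirstCat : List (String × List String) → String → Option String
  | [], _ => none
  | (c, kws) :: t, cap => if pvMatch kws cap then some c else pvFirstCat t cap

-- the key A appends cap to
def pvTgt (cap : String) : String := (pvFirstCat pvCats cap).getD "General"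

-- all ten keys, in A's dict order
def pvAllKeys : List String := pvCats.map (·.1) ++ ["General"]

theorem pvFirstCat_mem (cats : List (String × List String)) (cap : String) (c : String)
    (h : pvFirstCat cats cap = some c) : c ∈ cats.map (·.1) := by
  induction cats with
  | nil => simp [pvFirstCat] at h
  | cons hd t ih =>
      obtain ⟨c', kws⟩ := hd
      simp only [pvFirstCat] at h
      by_cases hm : pvMatch kws cap
      · simp [hm] at h; simp [h]
      · simp [hm] at h; simp [ih h]

theorem pvFirstCat_none_iff (cats : List (String × List String)) (cap : String) :
    pvFirstCat cats cap = none ↔ cats.any (fun p => pvMatch p.2 cap) = false := by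
  induction cats with
  | nil => simp [pvFirstCat]
  | cons hd t ih =>
      obtain ⟨c', kws⟩ := hd
      by_cases hm : pvMatch kws cap <;> simp [pvFirstCat, hm, ih]

theorem pvCategorize_eq (cats : List (String × List String)) (d : PySem.Dict String (List String))
    (cap : String) :
    pvCategorize cats d cap (PySem.Str.lower cap)
      = d.modify ((pvFirstCat cats cap).getD "General") [] (· ++ [cap]) := by
  induction cats generalizing d with
  | nil => rfl
  | cons hd t ih =>
      obtain ⟨c, kws⟩ := hd
      simp only [pvCategorize, pvFirstCat, pvMatch]
      by_cases hm : (kws.any fun kw => PySem.Str.isIn kw (PySem.Str.lower cap)) = true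
      · rw [if_pos hm, if_pos hm]
        rfl
      · rw [if_neg hm, if_neg hm, ih]

theorem pvTgt_mem (cap : String) : pvTgt cap ∈ pvAllKeys := by
  unfold pvTgt pvAllKeys
  cases h : pvFirstCat pvCats cap with
  | none => simp
  | some c => simp [pvFirstCat_mem _ _ _ h]

-- map-then-filter-nonempty is a filterMap over the keys
theorem pv_map_filter_nonempty (g : String → List String) (keys : List String) :
    (keys.map (fun k => (k, g k))).filter (fun p => !p.2.isEmpty)
      = keys.filterMap (fun k => if (g k).isEmpty then none else some (k, g k)) := by
  induction keys with
  | nil => rfl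
  | cons k t ih =>
      by_cases h : g k = []
      · simp [h, ih]
      · simp [h, ih]

-- characterization of B's per-category loop
def pvBSpec : List (String × List String) → List String → List (String × List String)
  | [], _ => []
  | (c, kws) :: t, rem =>
      (if (rem.filter (fun cap => pvMatch kws cap)).isEmpty then []
       else [(c, rem.filter (fun cap => pvMatch kws cap))])
        ++ pvBSpec t (rem.filter (fun cap => !pvMatch kws cap))

theorem pvB_foldl_aux (cats : List (String × List String)) (res : List (String × List String))
    (rem : List String) :
    cats.foldl
      (fun (p : List (String × List String) × List String) ckws =>
        let m := p.2.filter (fun cap => pvMatch ckws.2 cap)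
        let r := p.2.filter (fun cap => !pvMatch ckws.2 cap)
        (if m.isEmpty then p.1 else p.1 ++ [(ckws.1, m)], r))
      (res, rem)
    = (res ++ pvBSpec cats rem, rem.filter (fun cap => !cats.any (fun p => pvMatch p.2 cap))) := by
  induction cats generalizing res rem with
  | nil => simp [pvBSpec]
  | cons hd t ih =>
      obtain ⟨c, kws⟩ := hd
      rw [List.foldl_cons]
      show t.foldl _
          (if (rem.filter (fun cap => pvMatch kws cap)).isEmpty then res
           else res ++ [(c, rem.filter (fun cap => pvMatch kws cap))],
           rem.filter (fun cap => !pvMatch kws cap)) = _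
      rw [ih]
      simp only [pvBSpec, Prod.mk.injEq]
      refine ⟨?_, ?_⟩
      · by_cases h : (rem.filter (fun cap => pvMatch kws cap)).isEmpty
        · simp [h]
        · simp [h]
      · rw [List.filter_filter]
        apply List.filter_congr
        intro cap _
        cases hp : pvMatch kws cap <;> simp [hp]

-- the same, with the port's literal lambda (definitionally equal step function)
theorem pvB_foldl (cats : List (String × List String)) (res : List (String × List String))
    (rem : List String) :
    cats.foldl
      (fun (p : List (String × List String) × List String) ckws =>
        let m := p.2.filter (fun cap => ckws.2.any (fun kw => PySem.Str.isIn kw (PySem.Str.lower cap)))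
        let r := p.2.filter (fun cap => !ckws.2.any (fun kw => PySem.Str.isIn kw (PySem.Str.lower cap)))
        (if m.isEmpty then p.1 else p.1 ++ [(ckws.1, m)], r))
      (res, rem)
    = (res ++ pvBSpec cats rem, rem.filter (fun cap => !cats.any (fun p => pvMatch p.2 cap))) :=
  pvB_foldl_aux cats res rem

theorem pvBSpec_eq (cats : List (String × List String)) (rem : List String)
    (hnd : (cats.map (·.1)).Nodup) :
    pvBSpec cats rem
      = (cats.map (·.1)).filterMap (fun k =>
          if (rem.filter (fun cap => pvFirstCat cats cap == some k)).isEmpty then none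
          else some (k, rem.filter (fun cap => pvFirstCat cats cap == some k))) := by
  induction cats generalizing rem with
  | nil => rfl
  | cons hd t ih =>
      obtain ⟨c, kws⟩ := hd
      simp only [List.map_cons, List.nodup_cons] at hnd
      obtain ⟨hc, hndt⟩ := hnd
      have hhead : rem.filter (fun cap => pvFirstCat ((c, kws) :: t) cap == some c)
          = rem.filter (fun cap => pvMatch kws cap) := by
        apply List.filter_congr
        intro cap _
        by_cases hm : pvMatch kws cap
        · simp [pvFirstCat, hm]
        · simp only [pvFirstCat, hm, Bool.false_eq_true, not_false_eq_true, if_neg]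
          cases hf : pvFirstCat t cap with
          | none => simp
          | some c' =>
              have hmem := pvFirstCat_mem t cap c' hf
              have hne : c' ≠ c := fun e => hc (e ▸ hmem)
              simp [hne]
      have htail : ∀ k ∈ t.map (·.1),
          rem.filter (fun cap => pvFirstCat ((c, kws) :: t) cap == some k)
            = (rem.filter (fun cap => !pvMatch kws cap)).filter (fun cap => pvFirstCat t cap == some k) := by
        intro k hk
        rw [List.filter_filter]
        apply List.filter_congr
        intro cap _
        have hck : c ≠ k := fun e => hc (e ▸ hk)
        by_cases hm : pvMatch kws cap
        · simp [pvFirstCat, hm, hck]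
        · simp [pvFirstCat, hm]
      simp only [pvBSpec, List.map_cons, List.filterMap_cons, hhead]
      rw [ih _ hndt]
      have hcong : List.filterMap (fun k =>
            if ((rem.filter (fun cap => !pvMatch kws cap)).filter (fun cap => pvFirstCat t cap == some k)).isEmpty then none
            else some (k, (rem.filter (fun cap => !pvMatch kws cap)).filter (fun cap => pvFirstCat t cap == some k)))
          (t.map (·.1))
          = List.filterMap (fun k =>
            if (rem.filter (fun cap => pvFirstCat ((c, kws) :: t) cap == some k)).isEmpty then none
            else some (k, rem.filter (fun cap => pvFirstCat ((c, kws) :: t) cap == some k)))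
          (t.map (·.1)) := by
        apply List.filterMap_congr
        intro k hk
        rw [htail k hk]
      rw [hcong]
      by_cases h : (rem.filter (fun cap => pvMatch kws cap)).isEmpty <;> simp [h]

-- ===== VERDICT (by name: the statement is the Claim_ definition above) =====
theorem detect_capability_categories_spec : Claim_equal_detect_capability_categories := by
  intro caps _
  unfold Spec_detect_capability_categories
  -- shared normal form
  set g : String → List String := fun k => caps.filter (fun cap => pvTgt cap == k) with hg
  have hGnot : "General" ∉ pvCats.map (·.1) := by decide
  have hnd : (pvCats.map (·.1)).Nodup := by decide
  -- ===== A side =====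
  have hfold : caps.foldl (fun d cap => pvCategorize pvCats d cap (PySem.Str.lower cap)) pvD0
      = caps.foldl (fun d cap => d.modify (pvTgt cap) [] (· ++ [cap])) pvD0 := by
    rw [show (fun (d : PySem.Dict String (List String)) cap => pvCategorize pvCats d cap (PySem.Str.lower cap))
          = (fun (d : PySem.Dict String (List String)) cap => d.modify (pvTgt cap) [] (· ++ [cap]))
        from funext fun d => funext fun cap => pvCategorize_eq pvCats d cap]
  have hget : ∀ k, (caps.foldl (fun d cap => d.modify (pvTgt cap) [] (· ++ [cap])) pvD0).getD k []
      = pvD0.getD k [] ++ g k := by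
    intro k
    have h := PySem.Dict.getD_foldl_modify_append (caps.map (fun cap => (pvTgt cap, cap))) pvD0 k
    simp only [List.foldl_map] at h
    rw [h, List.filter_map, List.map_map]
    simp [Function.comp_def, hg]
  have hkeysF : (caps.foldl (fun d cap => d.modify (pvTgt cap) [] (· ++ [cap])) pvD0).keys
      = pvD0.keys := by
    have h := PySem.Dict.keys_foldl_modify_key caps pvTgt [] (fun _ cap => (· ++ [cap])) pvD0
    rw [h, PySem.Set.update_eq_append_filter]
    have hnil : (PySem.Set.ofList (caps.map pvTgt)).filter (fun y => !PySem.Set.contains pvD0.keys y) = [] := by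
      apply List.filter_eq_nil_iff.mpr
      intro y hy
      have hy' : y ∈ caps.map pvTgt := (PySem.Set.mem_ofList _ _).mp hy
      obtain ⟨cap, _, rfl⟩ := List.mem_map.mp hy'
      have hkeys0 : pvD0.keys = pvAllKeys := by decide
      have hk : pvTgt cap ∈ pvD0.keys := by rw [hkeys0]; exact pvTgt_mem cap
      simp [PySem.Set.contains, hk]
    rw [hnil, List.append_nil]
  have hndF : (caps.foldl (fun d cap => d.modify (pvTgt cap) [] (· ++ [cap])) pvD0).keys.Nodup := by
    exact PySem.Dict.nodup_keys_foldl_modify_key caps pvTgt [] (fun _ cap => (· ++ [cap])) pvD0 (by decide)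
  have hd0 : ∀ k ∈ pvD0.keys, pvD0.getD k [] = [] := by decide
  have hA : detect_capability_categories caps
      = pvAllKeys.filterMap (fun k => if (g k).isEmpty then none else some (k, g k)) := by
    show ((caps.foldl (fun d cap => pvCategorize pvCats d cap (PySem.Str.lower cap)) pvD0).items.filter
        (fun p => !p.2.isEmpty)) = _
    rw [hfold, PySem.Dict.items_eq_map_keys _ hndF [], hkeysF]
    have : pvD0.keys.map (fun k => (k, (caps.foldl (fun d cap => d.modify (pvTgt cap) [] (· ++ [cap])) pvD0).getD k []))
        = pvD0.keys.map (fun k => (k, g k)) := by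
      apply List.map_congr_left
      intro k hk
      rw [hget k, hd0 k hk, List.nil_append]
    rw [this]
    have hkeys0 : pvD0.keys = pvAllKeys := by decide
    rw [hkeys0, pv_map_filter_nonempty]
  -- ===== B side =====
  have hfiltName : ∀ k ∈ pvCats.map (·.1),
      caps.filter (fun cap => pvFirstCat pvCats cap == some k) = g k := by
    intro k hk
    apply List.filter_congr
    intro cap _
    cases hf : pvFirstCat pvCats cap with
    | none =>
        have hkG : k ≠ "General" := fun e => hGnot (e ▸ hk)
        simp [pvTgt, hf, hkG.symm]
    | some c => simp [pvTgt, hf]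
  have hfiltGen : caps.filter (fun cap => !pvCats.any (fun p => pvMatch p.2 cap)) = g "General" := by
    apply List.filter_congr
    intro cap _
    cases hf : pvFirstCat pvCats cap with
    | none =>
        have := (pvFirstCat_none_iff pvCats cap).mp hf
        simp [pvTgt, hf, this]
    | some c =>
        have hcmem := pvFirstCat_mem pvCats cap c hf
        have hcG : c ≠ "General" := fun e => hGnot (e ▸ hcmem)
        have hany : pvCats.any (fun p => pvMatch p.2 cap) = true := by
          by_contra hx
          have : pvFirstCat pvCats cap = none := (pvFirstCat_none_iff pvCats cap).mpr (by simpa using hx)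
          simp [this] at hf
        simp [pvTgt, hf, hany, hcG]
  have hB : detect_capability_categories_alt caps
      = pvAllKeys.filterMap (fun k => if (g k).isEmpty then none else some (k, g k)) := by
    have e := pvB_foldl pvCats [] caps
    show (if (pvCats.foldl
        (fun (p : List (String × List String) × List String) ckws =>
          let m := p.2.filter (fun cap => ckws.2.any (fun kw => PySem.Str.isIn kw (PySem.Str.lower cap)))
          let r := p.2.filter (fun cap => !ckws.2.any (fun kw => PySem.Str.isIn kw (PySem.Str.lower cap)))
          (if m.isEmpty then p.1 else p.1 ++ [(ckws.1, m)], r))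
        ([], caps)).2.isEmpty
      then (pvCats.foldl
        (fun (p : List (String × List String) × List String) ckws =>
          let m := p.2.filter (fun cap => ckws.2.any (fun kw => PySem.Str.isIn kw (PySem.Str.lower cap)))
          let r := p.2.filter (fun cap => !ckws.2.any (fun kw => PySem.Str.isIn kw (PySem.Str.lower cap)))
          (if m.isEmpty then p.1 else p.1 ++ [(ckws.1, m)], r))
        ([], caps)).1
      else (pvCats.foldl
        (fun (p : List (String × List String) × List String) ckws =>
          let m := p.2.filter (fun cap => ckws.2.any (fun kw => PySem.Str.isIn kw (PySem.Str.lower cap)))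
          let r := p.2.filter (fun cap => !ckws.2.any (fun kw => PySem.Str.isIn kw (PySem.Str.lower cap)))
          (if m.isEmpty then p.1 else p.1 ++ [(ckws.1, m)], r))
        ([], caps)).1 ++ [("General", (pvCats.foldl
        (fun (p : List (String × List String) × List String) ckws =>
          let m := p.2.filter (fun cap => ckws.2.any (fun kw => PySem.Str.isIn kw (PySem.Str.lower cap)))
          let r := p.2.filter (fun cap => !ckws.2.any (fun kw => PySem.Str.isIn kw (PySem.Str.lower cap)))
          (if m.isEmpty then p.1 else p.1 ++ [(ckws.1, m)], r))
        ([], caps)).2)]) = _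
    rw [e]
    simp only [List.nil_append]
    rw [hfiltGen, pvBSpec_eq pvCats caps hnd]
    have hres : (pvCats.map (·.1)).filterMap (fun k =>
          if (caps.filter (fun cap => pvFirstCat pvCats cap == some k)).isEmpty then none
          else some (k, caps.filter (fun cap => pvFirstCat pvCats cap == some k)))
        = (pvCats.map (·.1)).filterMap (fun k => if (g k).isEmpty then none else some (k, g k)) := by
      apply List.filterMap_congr
      intro k hk
      rw [hfiltName k hk]
    rw [hres]
    unfold pvAllKeys
    rw [List.filterMap_append]
    by_cases h : (g "General").isEmpty
    · simp [List.isEmpty_iff.mp h]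
    · have h' : ¬ g "General" = [] := by simpa [List.isEmpty_iff] using h
      simp [h, h']
  rw [hA, hB]
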